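-- pv_equiv track=rewrite | github.com/fulivi/dump-clone-9825 | conv9825.py | _skip_to_next_block
-- ===== SOURCE A (Python) =====
-- def _skip_to_next_block(image , pos , min_gap):
--     skipping = True
--     for blk_pos , blk_end_pos , words in image:
--         if skipping:
--             if pos <= blk_end_pos:
--                 skipping = False
--                 last_blk_end = blk_end_pos
--         elif (blk_pos - last_blk_end) >= min_gap:
--             return blk_pos , blk_end_pos , words
--         else:
--             last_blk_end = blk_end_pos
--     return 0 , 0 , None
-- ===== SOURCE B (Python) =====
-- def _skip_to_next_block(image, pos, min_gap):
--     blocks = list(image)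
--     n = len(blocks)
--     start = None
--     for k in range(n):
--         if pos <= blocks[k][1]:
--             start = k
--             break
--     if start is None:
--         return 0, 0, None
--     # indices j whose gap to the preceding block qualifies (sorted ascending)
--     gaps = [j for j in range(1, n) if blocks[j][0] - blocks[j - 1][1] >= min_gap]
--     # binary search for the first qualifying index strictly past start
--     lo, hi = 0, len(gaps)
--     while lo < hi:
--         mid = (lo + hi) // 2
--         if gaps[mid] <= start:
--             lo = mid + 1
--         else:
--             hi = mid
--     if lo < len(gaps):
--         return blocks[gaps[lo]]
--     return 0, 0, None
-- ===== Notes on version B (the rewrite author's own statement) =====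
-- stated objective: alternative
-- what changed: Instead of A's stateful single scan with a skipping flag and running last_blk_end, B materializes the sorted list of ALL qualifying gap indices (j with blocks[j][0]-blocks[j-1][1] >= min_gap), locates the start index separately, and binary-searches the gap-index list for the first index past the start.
import Mathlib
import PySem

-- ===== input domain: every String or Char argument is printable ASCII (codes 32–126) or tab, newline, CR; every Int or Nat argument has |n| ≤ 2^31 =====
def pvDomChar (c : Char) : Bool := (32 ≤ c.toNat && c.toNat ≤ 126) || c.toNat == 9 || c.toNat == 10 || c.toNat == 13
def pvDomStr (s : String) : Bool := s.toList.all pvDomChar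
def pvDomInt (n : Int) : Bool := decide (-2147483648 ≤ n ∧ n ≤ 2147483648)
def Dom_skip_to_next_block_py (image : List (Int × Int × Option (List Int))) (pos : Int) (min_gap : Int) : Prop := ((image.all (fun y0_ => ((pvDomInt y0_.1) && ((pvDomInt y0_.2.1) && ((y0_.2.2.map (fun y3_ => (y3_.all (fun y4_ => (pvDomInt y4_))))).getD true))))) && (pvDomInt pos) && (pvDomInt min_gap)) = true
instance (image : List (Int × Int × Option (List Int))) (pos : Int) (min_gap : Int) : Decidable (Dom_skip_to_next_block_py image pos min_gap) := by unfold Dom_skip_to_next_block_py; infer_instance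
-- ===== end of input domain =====

-- B replaces A's stateful single scan by an index-based pipeline: locate the start index,
-- precompute the sorted list of ALL qualifying gap indices, then binary-search it for the
-- first index past the start (objective: alternative; same asymptotic cost).

-- ===== PORT A =====
-- A's for-loop with early return and state (skipping, last_blk_end); last_blk_end starts
-- unassigned in Python and is never read while skipping, so it carries 0 until first set.
def pvALoop (pos min_gap : Int) : List (Int × Int × Option (List Int)) → Bool → Int → Int × Int × Option (List Int)
  | [], _, _ => (0, 0, none)
  | (blk_pos, blk_end_pos, words) :: rest, skipping, last_blk_end =>
    if skipping then
      if pos ≤ blk_end_pos then pvALoop pos min_gap rest false blk_end_pos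
      else pvALoop pos min_gap rest true last_blk_end
    else if blk_pos - last_blk_end ≥ min_gap then (blk_pos, blk_end_pos, words)
    else pvALoop pos min_gap rest false blk_end_pos

def skip_to_next_block_py (image : List (Int × Int × Option (List Int))) (pos : Int) (min_gap : Int) : Int × Int × Option (List Int) :=
  pvALoop pos min_gap image true 0

-- ===== PORT B =====
-- default for in-bounds list indexing (blocks[j] in Source B is only evaluated in bounds)
def pvDflt : Int × Int × Option (List Int) := (0, 0, none)

-- Source B's start-finding loop: index of the first block whose end reaches pos
def pvFindStart (pos : Int) : List (Int × Int × Option (List Int)) → Option Nat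
  | [] => none
  | b :: rest => if pos ≤ b.2.1 then some 0 else (pvFindStart pos rest).map (· + 1)

-- the comprehension's filter condition: blocks[j][0] - blocks[j-1][1] >= min_gap
def pvGapOk (blocks : List (Int × Int × Option (List Int))) (min_gap : Int) (j : Nat) : Bool :=
  decide (min_gap ≤ (blocks.getD j pvDflt).1 - (blocks.getD (j - 1) pvDflt).2.1)

-- gaps = [j for j in range(1, n) if ...]
def pvGaps (blocks : List (Int × Int × Option (List Int))) (min_gap : Int) : List Nat :=
  (List.range' 1 (blocks.length - 1)).filter (pvGapOk blocks min_gap)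

-- Source B's binary-search while loop (bisect_right-style)
def pvBS (gaps : List Nat) (start lo hi : Nat) : Nat :=
  if h : lo < hi then
    if gaps.getD ((lo + hi) / 2) 0 ≤ start then pvBS gaps start ((lo + hi) / 2 + 1) hi
    else pvBS gaps start lo ((lo + hi) / 2)
  else lo
termination_by hi - lo
decreasing_by all_goals omega

def skip_to_next_block_py_alt (image : List (Int × Int × Option (List Int))) (pos : Int) (min_gap : Int) : Int × Int × Option (List Int) :=
  match pvFindStart pos image with
  | none => (0, 0, none)
  | some start =>
    let gaps := pvGaps image min_gap
    let lo := pvBS gaps start 0 gaps.length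
    if lo < gaps.length then image.getD (gaps.getD lo 0) pvDflt else (0, 0, none)

-- ===== PRECONDITION & SPEC =====
def Spec_skip_to_next_block_py (image : List (Int × Int × Option (List Int))) (pos : Int) (min_gap : Int) (out : Int × Int × Option (List Int)) : Prop := out = skip_to_next_block_py_alt image pos min_gap
instance (image : List (Int × Int × Option (List Int))) (pos : Int) (min_gap : Int) (out : Int × Int × Option (List Int)) : Decidable (Spec_skip_to_next_block_py image pos min_gap out) := by unfold Spec_skip_to_next_block_py; infer_instance

-- ===== CLAIM (what is proved, stated in full; the proofs are below) =====
def Claim_equal_skip_to_next_block_py : Prop := ∀ (image : List (Int × Int × Option (List Int))) (pos : Int) (min_gap : Int), Dom_skip_to_next_block_py image pos min_gap → Spec_skip_to_next_block_py image pos min_gap (skip_to_next_block_py image pos min_gap)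

-- ===== LEMMAS AND PROOFS =====

-- reference: first index m > k (m < n) whose gap to block m-1 qualifies
def pvMFind (blocks : List (Int × Int × Option (List Int))) (min_gap : Int) (k : Nat) : Option Nat :=
  (List.range' (k + 1) (blocks.length - (k + 1))).find? (pvGapOk blocks min_gap)

theorem pvMFind_step (blocks : List (Int × Int × Option (List Int))) (g : Int) (k : Nat)
    (h : k + 1 < blocks.length) :
    pvMFind blocks g k =
      if pvGapOk blocks g (k + 1) then some (k + 1) else pvMFind blocks g (k + 1) := by
  unfold pvMFind
  have h1 : blocks.length - (k + 1) = (blocks.length - (k + 2)) + 1 := by omega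
  rw [h1, List.range'_succ, List.find?_cons]
  cases hg : pvGapOk blocks g (k + 1) <;> simp

theorem pvMFind_stop (blocks : List (Int × Int × Option (List Int))) (g : Int) (k : Nat)
    (h : blocks.length ≤ k + 1) :
    pvMFind blocks g k = none := by
  unfold pvMFind
  have h1 : blocks.length - (k + 1) = 0 := by omega
  rw [h1]; rfl

-- skipping phase of A reduces to pvFindStart plus the non-skipping phase
theorem pvALoop_true (pos g : Int) (blocks : List (Int × Int × Option (List Int))) (last : Int) :
    pvALoop pos g blocks true last =
      match pvFindStart pos blocks with
      | none => (0, 0, none)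
      | some k => pvALoop pos g (blocks.drop (k + 1)) false ((blocks.getD k pvDflt).2.1) := by
  induction blocks generalizing last with
  | nil => rfl
  | cons b rest ih =>
    obtain ⟨p, e, w⟩ := b
    by_cases h : pos ≤ e
    · simp [pvALoop, pvFindStart, h]
    · have : pvALoop pos g ((p, e, w) :: rest) true last = pvALoop pos g rest true last := by
        simp [pvALoop, h]
      rw [this, ih last]
      simp only [pvFindStart, if_neg h]
      cases hfs : pvFindStart pos rest with
      | none => rfl
      | some k => simp [List.drop_succ_cons]

theorem pvALoop_cons_false (pos min_gap p e last : Int) (w : Option (List Int)) (rest : List (Int × Int × Option (List Int))) :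
    pvALoop pos min_gap ((p, e, w) :: rest) false last =
      if p - last ≥ min_gap then (p, e, w) else pvALoop pos min_gap rest false e := by
  simp [pvALoop]

-- non-skipping phase of A, starting right after block k, finds pvMFind k
theorem pvALoop_false (blocks : List (Int × Int × Option (List Int))) (pos g : Int) :
    ∀ fuel k, blocks.length - (k + 1) ≤ fuel → k < blocks.length →
    pvALoop pos g (blocks.drop (k + 1)) false ((blocks.getD k pvDflt).2.1) =
      match pvMFind blocks g k with
      | some m => blocks.getD m pvDflt
      | none => (0, 0, none) := by
  intro fuel
  induction fuel with
  | zero =>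
    intro k hf hk
    have hlen : blocks.length ≤ k + 1 := by omega
    rw [List.drop_eq_nil_of_le hlen, pvMFind_stop blocks g k hlen]
    rfl
  | succ fuel ih =>
    intro k hf hk
    by_cases h : k + 1 < blocks.length
    · rw [List.drop_eq_getElem_cons h, pvMFind_step blocks g k h]
      rcases hb : blocks[k + 1] with ⟨p, e, w⟩
      have hget : blocks.getD (k + 1) pvDflt = (p, e, w) := by
        rw [List.getD_eq_getElem blocks pvDflt h, hb]
      have hgap : pvGapOk blocks g (k + 1) = decide (g ≤ p - (blocks.getD k pvDflt).2.1) := by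
        unfold pvGapOk
        rw [Nat.add_sub_cancel, hget]
      by_cases hq : g ≤ p - (blocks.getD k pvDflt).2.1
      · have hT : pvGapOk blocks g (k + 1) = true := by rw [hgap]; exact decide_eq_true hq
        rw [pvALoop_cons_false, if_pos (show p - (blocks.getD k pvDflt).2.1 ≥ g from hq), if_pos hT]
        show (p, e, w) = blocks.getD (k + 1) pvDflt
        rw [hget]
      · have hF : pvGapOk blocks g (k + 1) = false := by rw [hgap]; exact decide_eq_false hq
        rw [pvALoop_cons_false, if_neg (show ¬ p - (blocks.getD k pvDflt).2.1 ≥ g from hq),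
          if_neg (show ¬ pvGapOk blocks g (k + 1) = true by simp [hF])]
        have he : e = (blocks.getD (k + 1) pvDflt).2.1 := by rw [hget]
        rw [he]
        exact ih (k + 1) (by omega) h
    · have hlen : blocks.length ≤ k + 1 := by omega
      rw [List.drop_eq_nil_of_le hlen, pvMFind_stop blocks g k hlen]
      rfl

-- binary search invariants: everything left of the result is ≤ start, everything from it on is > start
theorem pvBS_spec (gaps : List Nat) (start : Nat)
    (mono : ∀ i j (_ : i < gaps.length) (hj : j < gaps.length), i ≤ j → gaps[i] ≤ gaps[j]) :
    ∀ fuel lo hi, hi - lo ≤ fuel → lo ≤ hi → hi ≤ gaps.length →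
    (∀ i (h : i < gaps.length), i < lo → gaps[i] ≤ start) →
    (∀ i (h : i < gaps.length), hi ≤ i → start < gaps[i]) →
    (∀ i (h : i < gaps.length), i < pvBS gaps start lo hi → gaps[i] ≤ start) ∧
    (∀ i (h : i < gaps.length), pvBS gaps start lo hi ≤ i → start < gaps[i]) ∧
    pvBS gaps start lo hi ≤ gaps.length := by
  intro fuel
  induction fuel with
  | zero =>
    intro lo hi hf hlh hhl inv1 inv2
    have : ¬ lo < hi := by omega
    rw [pvBS, dif_neg this]
    exact ⟨fun i h hi' => inv1 i h hi', fun i h hi' => inv2 i h (by omega), by omega⟩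
  | succ fuel ih =>
    intro lo hi hf hlh hhl inv1 inv2
    by_cases h : lo < hi
    · rw [pvBS, dif_pos h]
      have hmidlt : (lo + hi) / 2 < gaps.length := by omega
      have hgd : gaps.getD ((lo + hi) / 2) 0 = gaps[(lo + hi) / 2] :=
        List.getD_eq_getElem gaps 0 hmidlt
      by_cases hc : gaps.getD ((lo + hi) / 2) 0 ≤ start
      · rw [if_pos hc]
        refine ih ((lo + hi) / 2 + 1) hi (by omega) (by omega) hhl ?_ inv2
        intro i hilen hilt
        calc gaps[i] ≤ gaps[(lo + hi) / 2] := mono i _ hilen hmidlt (by omega)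
          _ ≤ start := by rw [← hgd]; exact hc
      · rw [if_neg hc]
        refine ih lo ((lo + hi) / 2) (by omega) (by omega) (by omega) inv1 ?_
        intro i hilen hge
        calc start < gaps[(lo + hi) / 2] := by rw [← hgd]; omega
          _ ≤ gaps[i] := mono _ i hmidlt hilen hge
    · rw [pvBS, dif_neg h]
      exact ⟨fun i hl hi' => inv1 i hl hi', fun i hl hi' => inv2 i hl (by omega), by omega⟩

theorem pvGaps_mem (blocks : List (Int × Int × Option (List Int))) (g : Int) (m : Nat) :
    m ∈ pvGaps blocks g ↔ (1 ≤ m ∧ m < blocks.length ∧ pvGapOk blocks g m = true) := by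
  unfold pvGaps
  rw [List.mem_filter, List.mem_range'_1]
  constructor
  · rintro ⟨⟨h1, h2⟩, h3⟩; exact ⟨h1, by omega, h3⟩
  · rintro ⟨h1, h2, h3⟩; exact ⟨⟨h1, by omega⟩, h3⟩

theorem pvGaps_mono (blocks : List (Int × Int × Option (List Int))) (g : Int) :
    ∀ i j (_ : i < (pvGaps blocks g).length) (hj : j < (pvGaps blocks g).length),
      i ≤ j → (pvGaps blocks g)[i] ≤ (pvGaps blocks g)[j] := by
  have hpw : List.Pairwise (· < ·) (pvGaps blocks g) :=
    (List.pairwise_lt_range' ..).filter _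
  intro i j hi hj hij
  rcases Nat.eq_or_lt_of_le hij with rfl | hlt
  · exact le_refl _
  · exact le_of_lt (List.pairwise_iff_getElem.mp hpw i j hi hj hlt)

theorem pvMFind_eq_some (blocks : List (Int × Int × Option (List Int))) (g : Int) :
    ∀ fuel k m, m - (k + 1) ≤ fuel → k < m → m < blocks.length → pvGapOk blocks g m = true →
    (∀ j, k < j → j < m → pvGapOk blocks g j = false) →
    pvMFind blocks g k = some m := by
  intro fuel
  induction fuel with
  | zero =>
    intro k m hf hk hm hg _
    have hm1 : m = k + 1 := by omega
    rw [pvMFind_step blocks g k (by omega), ← hm1, hg]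
    simp
  | succ fuel ih =>
    intro k m hf hk hm hg hmin
    rw [pvMFind_step blocks g k (by omega)]
    by_cases he : m = k + 1
    · rw [← he, hg]; simp
    · have hlt : k + 1 < m := by omega
      rw [hmin (k + 1) (by omega) hlt]
      simp only [Bool.false_eq_true, if_false]
      exact ih (k + 1) m (by omega) hlt hm hg (fun j hj1 hj2 => hmin j (by omega) hj2)

theorem pvMFind_eq_none (blocks : List (Int × Int × Option (List Int))) (g : Int) (k : Nat)
    (h : ∀ j, k < j → j < blocks.length → pvGapOk blocks g j = false) :
    pvMFind blocks g k = none := by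
  unfold pvMFind
  rw [List.find?_eq_none]
  intro j hj
  rw [List.mem_range'_1] at hj
  have := h j (by omega) (by omega)
  simp [this]

theorem pvFindStart_lt (pos : Int) (blocks : List (Int × Int × Option (List Int))) (k : Nat)
    (h : pvFindStart pos blocks = some k) : k < blocks.length := by
  induction blocks generalizing k with
  | nil => simp [pvFindStart] at h
  | cons b rest ih =>
    rw [pvFindStart] at h
    split_ifs at h with hc
    · cases h
      simp
    · cases hrest : pvFindStart pos rest with
      | none => rw [hrest] at h; simp at h
      | some k' =>
        rw [hrest] at h
        simp at h
        have := ih k' hrest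
        simp
        omega

-- ===== VERDICT (by name: the statement is the Claim_ definition above) =====
theorem skip_to_next_block_py_spec : Claim_equal_skip_to_next_block_py := by
  intro image pos g _
  unfold Spec_skip_to_next_block_py skip_to_next_block_py skip_to_next_block_py_alt
  rw [pvALoop_true pos g image 0]
  cases hfs : pvFindStart pos image with
  | none => rfl
  | some k =>
    show pvALoop pos g (image.drop (k + 1)) false ((image.getD k pvDflt).2.1) =
      (if pvBS (pvGaps image g) k 0 (pvGaps image g).length < (pvGaps image g).length
       then image.getD ((pvGaps image g).getD (pvBS (pvGaps image g) k 0 (pvGaps image g).length) 0) pvDflt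
       else (0, 0, none))
    have hk : k < image.length := pvFindStart_lt pos image k hfs
    rw [pvALoop_false image pos g (image.length - (k + 1)) k (le_refl _) hk]
    set gaps := pvGaps image g with hgaps
    obtain ⟨h1, h2, h3⟩ := pvBS_spec gaps k (pvGaps_mono image g) gaps.length 0 gaps.length
      (by omega) (by omega) (le_refl _) (fun i h hi => absurd hi (by omega)) (fun i h hi => by omega)
    set r := pvBS gaps k 0 gaps.length with hr
    by_cases hrlt : r < gaps.length
    · rw [if_pos hrlt]
      have hgd : gaps.getD r 0 = gaps[r] := List.getD_eq_getElem gaps 0 hrlt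
      have hmem : gaps[r] ∈ gaps := List.getElem_mem hrlt
      obtain ⟨hm1, hm2, hm3⟩ := (pvGaps_mem image g _).mp hmem
      have hmfind : pvMFind image g k = some gaps[r] := by
        refine pvMFind_eq_some image g (gaps[r] - (k + 1)) k gaps[r] (le_refl _)
          (h2 r hrlt (le_refl _)) hm2 hm3 ?_
        intro j hj1 hj2
        by_contra hcon
        have hjg : pvGapOk image g j = true := by
          cases hx : pvGapOk image g j
          · exact absurd hx hcon
          · rfl
        have hjmem : j ∈ gaps := (pvGaps_mem image g j).mpr ⟨by omega, by omega, hjg⟩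
        obtain ⟨i, hilen, hieq⟩ := List.mem_iff_getElem.mp hjmem
        by_cases hir : i < r
        · have := h1 i hilen hir
          omega
        · have hmo : gaps[r] ≤ gaps[i] := pvGaps_mono image g r i hrlt hilen (by omega)
          omega
      rw [hmfind, hgd]
    · rw [if_neg hrlt]
      have hmfind : pvMFind image g k = none := by
        refine pvMFind_eq_none image g k ?_
        intro j hj1 hj2
        by_contra hcon
        have hjg : pvGapOk image g j = true := by
          cases hx : pvGapOk image g j
          · exact absurd hx hcon
          · rfl
        have hjmem : j ∈ gaps := (pvGaps_mem image g j).mpr ⟨by omega, hj2, hjg⟩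
        obtain ⟨i, hilen, hieq⟩ := List.mem_iff_getElem.mp hjmem
        have := h1 i hilen (by omega)
        omega
      rw [hmfind]
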